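-- pv_equiv track=rewrite | github.com/TumsaUmata/the_last_lap | Google Assessment/Practice/question_one.py | solution
-- ===== SOURCE A (Python) =====
-- def solution(A):
--     max_value = float('-inf')
--     rows_created = 0
--     for i in A:
--         if i > max_value:
--             rows_created += 1
--             max_value = i
--     return rows_created
-- ===== SOURCE B (Python) =====
-- def solution(A):
--     count = 0
--     for i in range(len(A)):
--         if all(A[j] < A[i] for j in range(i)):
--             count += 1
--     return count
-- ===== Notes on version B (the rewrite author's own statement) =====
-- stated objective: alternative
-- what changed: Replaces the single-pass running-maximum counter with a per-index rescan that counts an element iff every preceding element is strictly smaller.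
import Mathlib
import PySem

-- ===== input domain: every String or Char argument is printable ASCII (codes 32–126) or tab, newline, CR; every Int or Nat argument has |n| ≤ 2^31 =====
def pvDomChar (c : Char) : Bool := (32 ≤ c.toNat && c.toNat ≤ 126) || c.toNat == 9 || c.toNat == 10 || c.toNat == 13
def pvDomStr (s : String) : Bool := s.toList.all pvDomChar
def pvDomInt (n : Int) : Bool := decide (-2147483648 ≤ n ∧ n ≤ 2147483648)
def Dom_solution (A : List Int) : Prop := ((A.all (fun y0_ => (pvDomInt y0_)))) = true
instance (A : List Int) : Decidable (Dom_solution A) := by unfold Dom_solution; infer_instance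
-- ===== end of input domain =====

-- B counts, for each index, whether every preceding element is strictly smaller (a per-index rescan);
-- A keeps a running maximum in a single pass. Alternative decomposition, not faster.

-- ===== PORT A =====
-- max_value = float('-inf') is modelled as `none` (every Int compares greater than it).
def solutionStep (st : Option Int × Int) (i : Int) : Option Int × Int :=
  match st.1 with
  | none => (some i, st.2 + 1)
  | some m => if i > m then (some i, st.2 + 1) else st

def solution (A : List Int) : Int := (A.foldl solutionStep (none, 0)).2

-- ===== PORT B =====
-- the loop over i with the inner `all(A[j] < A[i] for j in range(i))`, carrying the prefix A[:i]
def solutionAltGo (pre : List Int) (rest : List Int) : Int :=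
  match rest with
  | [] => 0
  | x :: xs => (if pre.all (fun y => y < x) then 1 else 0) + solutionAltGo (pre ++ [x]) xs

def solution_alt (A : List Int) : Int := solutionAltGo [] A

-- ===== PRECONDITION & SPEC =====
def Spec_solution (A : List Int) (out : Int) : Prop := out = solution_alt A
instance (A : List Int) (out : Int) : Decidable (Spec_solution A out) := by unfold Spec_solution; infer_instance

-- ===== CLAIM (what is proved, stated in full; the proofs are below) =====
def Claim_equal_solution : Prop := ∀ (A : List Int), Dom_solution A → Spec_solution A (solution A)

-- ===== LEMMAS AND PROOFS =====

-- the state A's fold carries after consuming a prefix p: (max of p or none, count so far)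
def pmaxF (o : Option Int) (x : Int) : Option Int :=
  match o with | none => some x | some m => some (max m x)

def pmax (p : List Int) : Option Int := p.foldl pmaxF none

theorem pmaxF_foldl_append (as : List Int) (x : Int) : ∀ (o : Option Int),
    (as ++ [x]).foldl pmaxF o
      = some (match as.foldl pmaxF o with | none => x | some m => max m x) := by
  induction as with
  | nil => intro o; cases o <;> simp [pmaxF]
  | cons b bs ih => intro o; simpa using ih (pmaxF o b)

theorem pmax_append (p : List Int) (x : Int) :
    pmax (p ++ [x]) = some (match pmax p with | none => x | some m => max m x) := by
  simpa [pmax] using pmaxF_foldl_append p x none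

theorem pmax_none_iff (p : List Int) : pmax p = none ↔ p = [] := by
  cases p using List.reverseRecOn with
  | nil => simp [pmax]
  | append_singleton as a => simp [pmax_append]

theorem pmax_le (p : List Int) (m : Int) (h : pmax p = some m) : ∀ y ∈ p, y ≤ m := by
  induction p using List.reverseRecOn generalizing m with
  | nil => simp [pmax] at h
  | append_singleton as a ih =>
      rw [pmax_append] at h
      intro y hy
      cases hp : pmax as with
      | none =>
          have : as = [] := (pmax_none_iff as).1 hp
          subst this
          simp [hp] at h
          simp at hy
          omega
      | some m' =>
          simp [hp] at h
          rcases List.mem_append.1 hy with hy | hy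
          · have := ih m' hp y hy
            have : m' ≤ m := by rw [← h]; exact le_max_left _ _
            omega
          · simp at hy
            subst hy
            rw [← h]; exact le_max_right _ _

theorem pmax_mem (p : List Int) (m : Int) (h : pmax p = some m) : m ∈ p := by
  induction p using List.reverseRecOn generalizing m with
  | nil => simp [pmax] at h
  | append_singleton as a ih =>
      rw [pmax_append] at h
      cases hp : pmax as with
      | none => simp [hp] at h; simp [h]
      | some m' =>
          simp [hp] at h
          rcases max_choice m' a with hc | hc <;> rw [hc] at h
          · exact List.mem_append.2 (Or.inl (h ▸ ih m' hp))
          · simp [← h]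

-- all-smaller check against the prefix, characterised by pmax
theorem all_lt_iff (p : List Int) (x : Int) :
    (p.all (fun y => y < x) = true) ↔ (∀ y ∈ p, y < x) := by
  simp

theorem key (r : List Int) : ∀ (p : List Int) (c : Int),
    (r.foldl solutionStep (pmax p, c)).2 = c + solutionAltGo p r := by
  induction r with
  | nil => intro p c; simp [solutionAltGo]
  | cons x xs ih =>
      intro p c
      have hstep : solutionStep (pmax p, c) x
          = (pmax (p ++ [x]), c + (if p.all (fun y => y < x) then 1 else 0)) := by
        cases hp : pmax p with
        | none =>
            have hpnil : p = [] := (pmax_none_iff p).1 hp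
            subst hpnil
            simp [solutionStep, pmax, pmaxF]
        | some m =>
            by_cases hx : x > m
            · have hall : p.all (fun y => y < x) = true := by
                rw [all_lt_iff]; intro y hy
                have := pmax_le p m hp y hy; omega
              simp [solutionStep, hx, hall, pmax_append, hp]
              omega
            · have hm := pmax_mem p m hp
              have hall : ¬ (p.all (fun y => y < x) = true) := by
                rw [all_lt_iff]; intro h; have := h m hm; omega
              have hmax : max m x = m := by omega
              simp [solutionStep, hx, hall, pmax_append, hp, hmax]
      rw [List.foldl_cons, hstep, ih]
      simp [solutionAltGo]
      ring

-- ===== VERDICT (by name: the statement is the Claim_ definition above) =====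
theorem solution_spec : Claim_equal_solution := by
  intro A _
  show solution A = solution_alt A
  have := key A [] 0
  simpa [solution, solution_alt, pmax] using this
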